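-- pv_equiv track=rewrite | github.com/AdamZhouSE/pythonHomework | Code/CodeRecords/2745/60594/275939.py | minxulie
-- ===== SOURCE A (Python) =====
-- def minxulie(oc):
--     zc=[]
--     zc2=[]
--     for index in range(len(oc)):
--         zc.append(len(oc[index]))
--     zc.sort()
--     for index in range(len(oc)):
--         if len(oc[index])==zc[0]:
--             zc2.append(oc[index])
--     return zc2
-- ===== SOURCE B (Python) =====
-- def minxulie(oc):
--     best = None
--     result = []
--     for s in oc:
--         l = len(s)
--         if best is None or l < best:
--             best = l
--             result = [s]
--         elif l == best:
--             result.append(s)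
--     return result
-- ===== Notes on version B (the rewrite author's own statement) =====
-- stated objective: faster
-- what changed: Single pass keeping the running minimum length and the current winners, instead of building a separate length list, sorting it, and re-scanning the input.
import Mathlib
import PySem

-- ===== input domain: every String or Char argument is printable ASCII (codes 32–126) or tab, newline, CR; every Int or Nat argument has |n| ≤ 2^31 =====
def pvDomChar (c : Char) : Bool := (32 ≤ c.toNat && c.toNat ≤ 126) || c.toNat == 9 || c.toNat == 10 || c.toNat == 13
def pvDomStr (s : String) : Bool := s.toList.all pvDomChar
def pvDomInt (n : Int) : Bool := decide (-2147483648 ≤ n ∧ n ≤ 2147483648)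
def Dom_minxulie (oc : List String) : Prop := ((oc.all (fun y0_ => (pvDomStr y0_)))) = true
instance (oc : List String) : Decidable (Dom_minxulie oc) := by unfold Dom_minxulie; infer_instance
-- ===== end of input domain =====

-- B replaces A's build-lengths / sort / rescan with one pass keeping the running minimum
-- length and the current winners; same return value on every input.

-- ===== PORT A =====
-- zc[0] is read with default 0; the default is unreachable: the second loop is empty exactly when zc is.
def minxulie (oc : List String) : List String :=
  let zc : List Int :=
    (PySem.List.pyRange 0 (oc.length : Int) 1).foldl
      (fun acc j => acc ++ [PySem.Str.len (PySem.List.pyGetD oc j "")]) []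
  let zc := PySem.List.sorted zc (fun x => x) false
  (PySem.List.pyRange 0 (oc.length : Int) 1).foldl
    (fun acc j =>
      if PySem.Str.len (PySem.List.pyGetD oc j "") == PySem.List.pyGetD zc 0 0 then
        acc ++ [PySem.List.pyGetD oc j ""]
      else acc) []

-- ===== PORT B =====
def minxulieStep (st : Option Int × List String) (s : String) : Option Int × List String :=
  let l := PySem.Str.len s
  match st with
  | (none, _) => (some l, [s])
  | (some b, r) =>
    if l < b then (some l, [s])
    else if l == b then (some b, r ++ [s])
    else (some b, r)

def minxulie_alt (oc : List String) : List String :=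
  (oc.foldl minxulieStep (none, [])).2

-- ===== PRECONDITION & SPEC =====
def Spec_minxulie (oc : List String) (out : List String) : Prop := out = minxulie_alt oc
instance (oc : List String) (out : List String) : Decidable (Spec_minxulie oc out) := by unfold Spec_minxulie; infer_instance

-- ===== CLAIM (what is proved, stated in full; the proofs are below) =====
def Claim_equal_minxulie : Prop := ∀ (oc : List String), Dom_minxulie oc → Spec_minxulie oc (minxulie oc)

-- ===== LEMMAS AND PROOFS =====

lemma pv_len_eq (s : String) : PySem.Str.len s = (s.length : Int) := by
  simp [PySem.Str.len_eq]

lemma pv_foldl_append_map (xs : List String) :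
    ∀ (init : List Int),
      xs.foldl (fun acc s => acc ++ [PySem.Str.len s]) init = init ++ xs.map PySem.Str.len := by
  induction xs with
  | nil => intro init; simp
  | cons x t ih => intro init; rw [List.foldl_cons, ih]; simp

lemma pv_foldl_filter (m : Int) (xs : List String) :
    ∀ (init : List String),
      xs.foldl (fun acc s => if PySem.Str.len s == m then acc ++ [s] else acc) init
        = init ++ xs.filter (fun s => PySem.Str.len s == m) := by
  induction xs with
  | nil => intro init; simp
  | cons x t ih =>
    intro init
    rw [List.foldl_cons, ih]
    simp only [pv_len_eq]
    by_cases h : (x.length : Int) = m <;> simp [List.filter_cons, h]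

lemma pv_foldl_min_le (xs : List String) :
    ∀ (b : Int), xs.foldl (fun a s => min a (PySem.Str.len s)) b ≤ b := by
  induction xs with
  | nil => intro b; simp
  | cons x t ih =>
    intro b
    calc t.foldl (fun a s => min a (PySem.Str.len s)) (min b (PySem.Str.len x))
        ≤ min b (PySem.Str.len x) := ih _
      _ ≤ b := min_le_left _ _

lemma pv_foldl_min_le_mem (xs : List String) :
    ∀ (b : Int) (y : String), y ∈ xs →
      xs.foldl (fun a s => min a (PySem.Str.len s)) b ≤ PySem.Str.len y := by
  induction xs with
  | nil => intro _ _ h; cases h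
  | cons x t ih =>
    intro b y hy
    rcases List.mem_cons.mp hy with rfl | hy
    · calc t.foldl (fun a s => min a (PySem.Str.len s)) (min b (PySem.Str.len y))
          ≤ min b (PySem.Str.len y) := pv_foldl_min_le _ _
        _ ≤ PySem.Str.len y := min_le_right _ _
    · exact ih _ y hy

lemma pv_foldl_min_mem (xs : List String) :
    ∀ (b : Int), xs.foldl (fun a s => min a (PySem.Str.len s)) b = b ∨
      xs.foldl (fun a s => min a (PySem.Str.len s)) b ∈ xs.map PySem.Str.len := by
  induction xs with
  | nil => intro b; left; rfl
  | cons x t ih =>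
    intro b
    rcases ih (min b (PySem.Str.len x)) with h | h
    · rw [List.foldl_cons, h]
      by_cases hb : b ≤ PySem.Str.len x
      · left; exact min_eq_left hb
      · right
        simp only [List.map_cons, List.mem_cons]
        left; exact min_eq_right (le_of_not_ge hb)
    · right
      rw [List.foldl_cons]
      simp only [List.map_cons, List.mem_cons]
      right; exact h

-- the step of B, written out (definitional)
lemma pv_step_eq (b : Int) (r : List String) (x : String) :
    minxulieStep (some b, r) x
      = if PySem.Str.len x < b then (some (PySem.Str.len x), [x])
        else if PySem.Str.len x == b then (some b, r ++ [x])
        else (some b, r) := rfl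

-- invariant of B's loop: running state = (minimum so far, winners so far)
lemma pv_step_fold (xs : List String) :
    ∀ (b : Int) (r : List String),
      xs.foldl minxulieStep (some b, r)
        = (some (xs.foldl (fun a s => min a (PySem.Str.len s)) b),
           (if xs.foldl (fun a s => min a (PySem.Str.len s)) b = b then r else []) ++
             xs.filter (fun s =>
               PySem.Str.len s == xs.foldl (fun a s => min a (PySem.Str.len s)) b)) := by
  induction xs with
  | nil => intro b r; simp
  | cons x t ih =>
    intro b r
    have hle : ∀ (c : Int), t.foldl (fun a s => min a (PySem.Str.len s)) c ≤ c :=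
      fun c => pv_foldl_min_le t c
    rw [List.foldl_cons, List.foldl_cons, pv_step_eq]
    simp only [pv_len_eq] at ih hle ⊢
    by_cases h1 : (x.length : Int) < b
    · rw [if_pos h1, ih]
      have hmin : min b (x.length : Int) = (x.length : Int) := min_eq_right h1.le
      rw [hmin]
      have hm := hle ((x.length : Int))
      set m := t.foldl (fun a s => min a ((s.length : Int))) ((x.length : Int)) with hmdef
      have hmb : ¬ m = b := by omega
      rw [if_neg hmb, List.filter_cons]
      by_cases h2 : m = (x.length : Int)
      · rw [if_pos h2, if_pos (by simp [h2])]
        simp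
      · rw [if_neg h2, if_neg (by simp; omega)]
    · rw [if_neg h1]
      have hmin : min b (x.length : Int) = b := min_eq_left (by omega)
      rw [hmin]
      have hm := hle b
      set m := t.foldl (fun a s => min a ((s.length : Int))) b with hmdef
      by_cases h2 : (x.length : Int) = b
      · rw [if_pos (by simp [h2]), ih, ← hmdef, List.filter_cons]
        by_cases h3 : m = b
        · have hq : (x.length : Int) = m := by omega
          simp [h3, hq]
        · have hq : ¬ (x.length : Int) = m := by omega
          simp [h3, hq]
      · rw [if_neg (by simp [h2]), ih, ← hmdef, List.filter_cons]
        have hxm : ¬ (x.length : Int) = m := by omega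
        by_cases h3 : m = b
        · rw [if_pos h3, if_neg (by simpa using hxm)]
        · rw [if_neg h3, if_neg (by simpa using hxm)]

-- B computes: the input filtered by the minimum length
lemma pv_alt_eq_filter (s : String) (t : List String) :
    minxulie_alt (s :: t)
      = (s :: t).filter (fun y =>
          PySem.Str.len y == t.foldl (fun a u => min a (PySem.Str.len u)) (PySem.Str.len s)) := by
  unfold minxulie_alt
  rw [List.foldl_cons,
    show minxulieStep (none, []) s = (some (PySem.Str.len s), [s]) from rfl,
    pv_step_fold]
  simp only [pv_len_eq]
  rw [List.filter_cons]
  set m := t.foldl (fun a u => min a ((u.length : Int))) ((s.length : Int)) with hmdef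
  by_cases h : m = (s.length : Int)
  · rw [if_pos h, if_pos (by simp [h])]; simp
  · rw [if_neg h, if_neg (by simp; omega)]; simp

-- ===== VERDICT (by name: the statement is the Claim_ definition above) =====
theorem minxulie_spec : Claim_equal_minxulie := by
  intro oc _
  show minxulie oc = minxulie_alt oc
  simp only [minxulie]
  rw [PySem.List.foldl_pyRange_zero_pyGetD' oc ""
      (fun acc s => acc ++ [PySem.Str.len s]) []]
  rw [pv_foldl_append_map oc []]
  simp only [List.nil_append]
  cases oc with
  | nil => rfl
  | cons s t =>
    set m := t.foldl (fun a u => min a (PySem.Str.len u)) (PySem.Str.len s) with hmdef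
    obtain ⟨h0, tl, hsort⟩ : ∃ h0 tl,
        PySem.List.sorted ((s :: t).map PySem.Str.len) (fun x => x) false = h0 :: tl := by
      rcases hE : PySem.List.sorted ((s :: t).map PySem.Str.len) (fun x => x) false with _ | ⟨h0, tl⟩
      · exact absurd ((PySem.List.sorted_eq_nil_iff _ _ _).mp hE) (by simp)
      · exact ⟨h0, tl, rfl⟩
    have hhm : h0 = m := by
      have hmem : h0 ∈ (s :: t).map PySem.Str.len := by
        rw [← PySem.List.mem_sorted ((s :: t).map PySem.Str.len) (fun x => x) false, hsort]
        exact List.mem_cons_self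
      have hle : ∀ y ∈ (s :: t).map PySem.Str.len, h0 ≤ y :=
        PySem.List.key_head_sorted_le _ _ hsort
      have h1 : h0 ≤ m := by
        rcases pv_foldl_min_mem t (PySem.Str.len s) with h | h
        · rw [hmdef, h]; exact hle _ (by simp)
        · exact hle _ (by simp only [List.map_cons, List.mem_cons]; right; exact h)
      have h2 : m ≤ h0 := by
        rcases List.mem_map.mp hmem with ⟨y, hy, rfl⟩
        rcases List.mem_cons.mp hy with rfl | hy
        · exact pv_foldl_min_le t _
        · exact pv_foldl_min_le_mem t _ y hy
      omega
    simp only [hsort, PySem.List.pyGetD_zero, List.getD_cons_zero]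
    rw [PySem.List.foldl_pyRange_zero_pyGetD' (s :: t) ""
        (fun acc y => if PySem.Str.len y == h0 then acc ++ [y] else acc) []]
    rw [pv_foldl_filter h0 (s :: t) [], pv_alt_eq_filter, hhm]
    simp only [pv_len_eq] at hmdef ⊢
    rw [hmdef]
    rfl
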